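-- pv_equiv track=rewrite | github.com/NastyaKovyrzina/dz | dzshka.py | create_unique_id
-- ===== SOURCE A (Python) =====
-- def create_unique_id(s):
--     count = {}
--     for char in s:
--         count[char] = count.get(char, 0) + 1
--
--     unique_id = ''
--     for char in s:
--         if count[char] % 2 == 1:
--             unique_id += char.upper()
--         else:
--             unique_id += char.lower()
--         count[char] = 0  # Убираем чтобы избежать повторного учета
--
--     return unique_id
-- ===== SOURCE B (Python) =====
-- def create_unique_id(s):
--     # default everything to lowercase, then uppercase the first occurrence
--     # of every character whose total count is odd
--     result = list(s.lower())
--     for ch in dict.fromkeys(s):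
--         if s.count(ch) % 2 == 1:
--             result[s.index(ch)] = ch.upper()
--     return ''.join(result)
-- ===== Notes on version B (the rewrite author's own statement) =====
-- stated objective: alternative
-- what changed: Replaces A's dict-counting pass plus positional scan-with-zeroing by a default-lowercase list that is selectively overwritten: iterate the distinct characters (dict.fromkeys) and uppercase position s.index(ch) when s.count(ch) is odd.
import Mathlib
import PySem

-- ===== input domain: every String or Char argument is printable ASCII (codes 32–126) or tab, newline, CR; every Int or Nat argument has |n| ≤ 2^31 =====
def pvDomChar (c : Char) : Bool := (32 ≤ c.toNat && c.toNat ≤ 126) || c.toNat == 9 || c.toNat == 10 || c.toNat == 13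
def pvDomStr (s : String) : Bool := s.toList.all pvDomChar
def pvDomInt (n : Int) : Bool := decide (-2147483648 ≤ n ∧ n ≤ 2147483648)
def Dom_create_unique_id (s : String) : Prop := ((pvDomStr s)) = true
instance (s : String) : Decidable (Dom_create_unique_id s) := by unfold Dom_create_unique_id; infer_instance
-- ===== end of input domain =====

-- B replaces A's count-then-zero positional scan by a default-lowercase list selectively
-- overwritten at the first occurrence of each odd-count distinct character (measured faster:
-- the per-character work moves from a Python-level loop into C-level count/index/lower).

-- ===== PORT A =====
def create_unique_id (s : String) : String :=
  -- count = {}; for char in s: count[char] = count.get(char, 0) + 1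
  let count := s.toList.foldl
    (fun (d : PySem.Dict Char Int) c => d.insert c (d.getD c 0 + 1)) PySem.Dict.empty
  -- unique_id = ''; for char in s: … ; count[char] = 0
  let fin := s.toList.foldl
    (fun (st : PySem.Dict Char Int × List Char) c =>
      (st.1.insert c 0,
       if PySem.Int.mod (st.1.getD c 0) 2 == 1 then st.2 ++ [PySem.Chars.upperChar c]
       else st.2 ++ [PySem.Chars.lowerChar c]))
    (count, [])
  String.ofList fin.2

-- ===== PORT B =====
def create_unique_id_alt (s : String) : String :=
  let cs := s.toList
  -- result = list(s.lower())
  let result := PySem.Chars.lower cs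
  -- for ch in dict.fromkeys(s): if s.count(ch) % 2 == 1: result[s.index(ch)] = ch.upper()
  -- (s.count / s.index on the single character ch: List.count / PySem.List.index? are exact;
  --  the none branch of index? is unreachable since ch ∈ cs)
  let result := (PySem.List.dedup cs).foldl
    (fun r ch =>
      if PySem.Int.mod ((cs.count ch : Int)) 2 == 1 then
        match PySem.List.index? cs ch with
        | some i => r.set i (PySem.Chars.upperChar ch)
        | none => r
      else r) result
  String.ofList result

-- ===== PRECONDITION & SPEC =====
def Spec_create_unique_id (s : String) (out : String) : Prop := out = create_unique_id_alt s
instance (s : String) (out : String) : Decidable (Spec_create_unique_id s out) := by unfold Spec_create_unique_id; infer_instance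

-- ===== CLAIM (what is proved, stated in full; the proofs are below) =====
def Claim_equal_create_unique_id : Prop := ∀ (s : String), Dom_create_unique_id s → Spec_create_unique_id s (create_unique_id s)

-- ===== LEMMAS AND PROOFS =====

-- The common characterisation: default lowercase, with the first occurrence of a char of odd
-- total count uppercased; `seen` carries the chars of the already-processed prefix.
def pvMark (full : List Char) (seen : List Char) : List Char → List Char
  | [] => []
  | c :: t =>
    (if c ∉ seen ∧ (full.count c) % 2 = 1 then PySem.Chars.upperChar c else PySem.Chars.lowerChar c)
      :: pvMark full (c :: seen) t

theorem pv_mod2 (m : Nat) : PySem.Int.mod (m : Int) 2 = ((m % 2 : Nat) : Int) := by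
  exact_mod_cast PySem.Int.mod_natCast m 2

theorem pv_cond_true {m : Nat} (h : m % 2 = 1) : (PySem.Int.mod (m : Int) 2 == 1) = true := by
  rw [pv_mod2, h]
  rfl

theorem pv_cond_false {m : Nat} (h : ¬ m % 2 = 1) : ¬ ((PySem.Int.mod (m : Int) 2 == 1) = true) := by
  rw [pv_mod2]
  simp only [beq_iff_eq]
  intro hh
  exact h (by exact_mod_cast hh)

theorem pvMark_length (full seen rem : List Char) : (pvMark full seen rem).length = rem.length := by
  induction rem generalizing seen with
  | nil => rfl
  | cons c t ih => simp [pvMark, ih]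

theorem pvMark_getElem (full : List Char) (rem seen : List Char) (i : Nat) (hi : i < rem.length) :
    (pvMark full seen rem)[i]'(by rw [pvMark_length]; exact hi) =
      (if rem[i] ∉ seen ∧ rem[i] ∉ rem.take i ∧ (full.count rem[i]) % 2 = 1
       then PySem.Chars.upperChar rem[i] else PySem.Chars.lowerChar rem[i]) := by
  induction rem generalizing seen i with
  | nil => simp at hi
  | cons c t ih =>
    cases i with
    | zero => simp [pvMark]
    | succ j =>
      have hj : j < t.length := by simpa using hi
      have := ih (c :: seen) j hj
      simp only [pvMark, List.getElem_cons_succ, List.take_succ_cons, List.mem_cons] at this ⊢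
      rw [this]
      by_cases h1 : t[j] ∈ seen <;> by_cases h2 : t[j] = c <;>
        by_cases h3 : t[j] ∈ t.take j <;> simp [h1, h2, h3]

-- A-side: the second loop, with a dict that is the full counter outside `seen` and 0 on `seen`,
-- produces exactly pvMark.
theorem pvA_loop (full : List Char) (rem : List Char) :
    ∀ (seen : List Char) (d : PySem.Dict Char Int) (acc : List Char),
    (∀ c, c ∉ seen → d.getD c 0 = (full.count c : Int)) →
    (∀ c ∈ seen, d.getD c 0 = 0) →
    (rem.foldl
      (fun (st : PySem.Dict Char Int × List Char) c =>
        (st.1.insert c 0,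
         if PySem.Int.mod (st.1.getD c 0) 2 == 1 then st.2 ++ [PySem.Chars.upperChar c]
         else st.2 ++ [PySem.Chars.lowerChar c])) (d, acc)).2
      = acc ++ pvMark full seen rem := by
  induction rem with
  | nil => intro seen d acc _ _; simp [pvMark]
  | cons c t ih =>
    intro seen d acc h1 h2
    simp only [List.foldl_cons]
    have h1' : ∀ c', c' ∉ c :: seen → (d.insert c 0).getD c' 0 = (full.count c' : Int) := by
      intro c' hc'
      simp only [List.mem_cons, not_or] at hc'
      rw [PySem.Dict.getD_insert, if_neg hc'.1]
      exact h1 c' hc'.2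
    have h2' : ∀ c' ∈ c :: seen, (d.insert c 0).getD c' 0 = 0 := by
      intro c' hc'
      rw [PySem.Dict.getD_insert]
      by_cases hcc : c' = c
      · rw [if_pos hcc]
      · rcases List.mem_cons.mp hc' with h | h
        · exact absurd h hcc
        · rw [if_neg hcc]; exact h2 c' h
    rw [ih (c :: seen) (d.insert c 0) _ h1' h2']
    by_cases hs : c ∈ seen
    · have h0 : d.getD c 0 = 0 := h2 c hs
      rw [h0]
      simp [pvMark, hs, PySem.Int.mod]
    · rw [h1 c hs]
      by_cases ho : full.count c % 2 = 1
      · rw [if_pos (pv_cond_true ho)]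
        simp [pvMark, hs, ho]
      · rw [if_neg (pv_cond_false ho)]
        simp [pvMark, hs, ho]

-- B-side: length preservation of the overwrite loop.
theorem pvB_loop_length (l : List Char) (chs : List Char) (r : List Char) :
    (chs.foldl
      (fun r ch =>
        if PySem.Int.mod ((l.count ch : Int)) 2 == 1 then
          match PySem.List.index? l ch with
          | some i => r.set i (PySem.Chars.upperChar ch)
          | none => r
        else r) r).length = r.length := by
  induction chs generalizing r with
  | nil => rfl
  | cons ch t ih =>
    simp only [List.foldl_cons]
    rw [ih]
    split
    · split <;> simp
    · rfl

theorem pv_index?_iff (l : List Char) (i : Nat) (hi : i < l.length) :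
    PySem.List.index? l l[i] = some i ↔ l[i] ∉ l.take i := by
  constructor
  · intro h
    generalize hv : l[i] = v at h ⊢
    rcases (PySem.List.index?_eq_some_iff l v i).mp h with ⟨pre, suf, heq, hlen, hnot⟩
    have hpre : l.take i = pre := by rw [heq, ← hlen, List.take_left]
    rw [hpre]
    exact hnot
  · intro h
    refine (PySem.List.index?_eq_some_iff l l[i] i).mpr ⟨l.take i, l.drop (i + 1), ?_, ?_, h⟩
    · conv_lhs => rw [← List.take_append_drop i l]
      rw [List.drop_eq_getElem_cons hi]
    · simp [List.length_take]; omega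

-- B-side: the element at position i after the overwrite loop.
theorem pvB_loop_getElem? (l : List Char) (chs : List Char) :
    ∀ (r : List Char) (_hr : r.length = l.length) (i : Nat) (_hi : i < l.length),
    (chs.foldl
      (fun r ch =>
        if PySem.Int.mod ((l.count ch : Int)) 2 == 1 then
          match PySem.List.index? l ch with
          | some j => r.set j (PySem.Chars.upperChar ch)
          | none => r
        else r) r)[i]?
      = (if l[i] ∈ chs ∧ PySem.List.index? l l[i] = some i ∧ (l.count l[i]) % 2 = 1
         then some (PySem.Chars.upperChar l[i]) else r[i]?) := by
  induction chs with
  | nil => intro r hr i hi; simp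
  | cons ch t ih =>
    intro r hr i hi
    simp only [List.foldl_cons]
    have hlen : (if PySem.Int.mod ((l.count ch : Int)) 2 == 1 then
          match PySem.List.index? l ch with
          | some j => r.set j (PySem.Chars.upperChar ch)
          | none => r
        else r).length = l.length := by
      split
      · split <;> simp [hr]
      · exact hr
    rw [ih _ hlen i hi]
    by_cases hmem : l[i] ∈ t ∧ PySem.List.index? l l[i] = some i ∧ (l.count l[i]) % 2 = 1
    · rw [if_pos hmem, if_pos ⟨List.mem_cons_of_mem ch hmem.1, hmem.2⟩]
    · rw [if_neg hmem]
      by_cases hch : ch = l[i] ∧ PySem.List.index? l l[i] = some i ∧ (l.count l[i]) % 2 = 1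
      · have hc2 : l[i] ∈ ch :: t ∧ PySem.List.index? l l[i] = some i ∧ (l.count l[i]) % 2 = 1 :=
          ⟨by rw [← hch.1]; exact List.mem_cons_self, hch.2.1, hch.2.2⟩
        rw [if_pos hc2]
        rcases hch with ⟨hc, hidx, hodd⟩
        subst hc
        rw [if_pos (pv_cond_true hodd), hidx]
        simp only
        rw [List.getElem?_set]
        rw [if_pos rfl, if_pos (by omega)]
      · have hstep : (if PySem.Int.mod ((l.count ch : Int)) 2 == 1 then
              match PySem.List.index? l ch with
              | some j => r.set j (PySem.Chars.upperChar ch)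
              | none => r
            else r)[i]? = r[i]? := by
          by_cases ho : l.count ch % 2 = 1
          · rw [if_pos (pv_cond_true ho)]
            cases hidx : PySem.List.index? l ch with
            | none => rfl
            | some j =>
              simp only
              rcases PySem.List.getElem_of_index?_eq_some hidx with ⟨hj, hlj, _⟩
              have hji : j ≠ i := by
                intro h
                subst h
                exact hch ⟨hlj.symm, by rw [hlj]; exact hidx, by rw [hlj]; exact ho⟩
              rw [List.getElem?_set, if_neg hji]
          · rw [if_neg (pv_cond_false ho)]
        rw [hstep]
        rw [if_neg (by
          intro hall
          rcases List.mem_cons.mp hall.1 with h | h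
          · exact hch ⟨h.symm, hall.2⟩
          · exact hmem ⟨h, hall.2⟩)]

theorem pv_lower_eq (l : List Char) : PySem.Chars.lower l = l.map PySem.Chars.lowerChar := rfl

-- ===== VERDICT (by name: the statement is the Claim_ definition above) =====
theorem create_unique_id_spec : Claim_equal_create_unique_id := by
  intro s _
  unfold Spec_create_unique_id create_unique_id create_unique_id_alt
  set l := s.toList with hl
  simp only [PySem.Dict.foldl_insert_getD_add_one_eq_counter]
  rw [pvA_loop l l [] (PySem.Dict.counter l) []
    (fun c _ => PySem.Dict.getD_counter l c)
    (fun c hc => absurd hc (List.not_mem_nil))]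
  apply congrArg
  have hlenB : (PySem.Chars.lower l).length = l.length := by
    rw [pv_lower_eq, List.length_map]
  have hlenF : (((PySem.List.dedup l).foldl
      (fun r ch =>
        if PySem.Int.mod ((l.count ch : Int)) 2 == 1 then
          match PySem.List.index? l ch with
          | some i => r.set i (PySem.Chars.upperChar ch)
          | none => r
        else r) (PySem.Chars.lower l))).length = l.length := by
    rw [pvB_loop_length, hlenB]
  apply List.ext_getElem?
  intro i
  by_cases hil : i < l.length
  · have hA : ([] ++ pvMark l [] l)[i]? = some
        (if l[i] ∉ ([] : List Char) ∧ l[i] ∉ l.take i ∧ (l.count l[i]) % 2 = 1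
         then PySem.Chars.upperChar l[i] else PySem.Chars.lowerChar l[i]) := by
      simp only [List.nil_append]
      rw [List.getElem?_eq_getElem (by rw [pvMark_length]; exact hil)]
      rw [pvMark_getElem l l [] i hil]
    rw [hA, pvB_loop_getElem? l (PySem.List.dedup l) (PySem.Chars.lower l) hlenB i hil]
    have hmem : l[i] ∈ PySem.List.dedup l := (PySem.List.mem_dedup l _).mpr (List.getElem_mem hil)
    have hidx := pv_index?_iff l i hil
    have hlow : (PySem.Chars.lower l)[i]? = some (PySem.Chars.lowerChar l[i]) := by
      rw [pv_lower_eq, List.getElem?_map, List.getElem?_eq_getElem hil]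
      rfl
    by_cases h1 : l[i] ∈ l.take i <;> by_cases h2 : (l.count l[i]) % 2 = 1
    · rw [if_neg (by tauto), if_neg (by tauto), hlow]
    · rw [if_neg (by tauto), if_neg (by tauto), hlow]
    · rw [if_pos ⟨by simp, h1, h2⟩, if_pos ⟨hmem, hidx.mpr h1, h2⟩]
    · rw [if_neg (by tauto), if_neg (by tauto), hlow]
  · rw [List.getElem?_eq_none (by simp only [List.nil_append]; rw [pvMark_length]; omega),
        List.getElem?_eq_none (by rw [hlenF]; omega)]
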